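-- pv_equiv track=rewrite | github.com/JustAnAverageGuy/ideal-enigma | codeforces/1883/E_Look_Back.py | ceillog2
-- ===== SOURCE A (Python) =====
-- def ceillog2(l,r):
--     if l <= r:
--         k = 0
--         while True:
--             if (l << k) > r: return -k+1
--             k += 1
--     else:
--         k = 0
--         while True:
--             if (r << k) >= l: return k
--             k += 1
-- ===== SOURCE B (Python) =====
-- def ceillog2(l, r):
--     if l <= r:
--         return 1 - (r // l).bit_length()
--     return ((l - 1) // r).bit_length()
-- ===== Notes on version B (the rewrite author's own statement) =====
-- stated objective: faster
-- what changed: Both doubling loops are replaced by closed-form bit_length formulas: 1 - (r//l).bit_length() for l<=r and ((l-1)//r).bit_length() for l>r, so B runs in O(1) with no loop.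
import Mathlib
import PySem

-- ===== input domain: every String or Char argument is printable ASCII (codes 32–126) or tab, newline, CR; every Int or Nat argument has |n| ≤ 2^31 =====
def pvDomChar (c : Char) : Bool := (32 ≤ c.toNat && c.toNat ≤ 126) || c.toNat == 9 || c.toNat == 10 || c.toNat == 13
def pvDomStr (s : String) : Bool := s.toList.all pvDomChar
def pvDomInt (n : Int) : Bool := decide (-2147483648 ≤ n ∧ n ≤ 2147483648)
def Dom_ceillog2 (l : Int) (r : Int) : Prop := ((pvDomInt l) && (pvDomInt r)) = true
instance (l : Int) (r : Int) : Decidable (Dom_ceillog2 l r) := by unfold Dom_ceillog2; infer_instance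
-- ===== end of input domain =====

-- B replaces A's two doubling loops by closed-form bit_length formulas (O(1), no loop).

-- ===== PORT A =====
-- A's two while-loops, transliterated with a fuel bound (fuel only makes the
-- recursion total; inside Pre_/Dom it is never exhausted, see lemmas below).
def pvLoopLe (l r : Int) (k : Nat) : Nat → Int
  | 0 => 0
  | fuel + 1 => if l * 2 ^ k > r then -(k : Int) + 1 else pvLoopLe l r (k + 1) fuel

def pvLoopGt (l r : Int) (k : Nat) : Nat → Int
  | 0 => 0
  | fuel + 1 => if r * 2 ^ k ≥ l then (k : Int) else pvLoopGt l r (k + 1) fuel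

def ceillog2 (l : Int) (r : Int) : Int :=
  if l ≤ r then pvLoopLe l r 0 100 else pvLoopGt l r 0 100

-- ===== PORT B =====
def ceillog2_alt (l : Int) (r : Int) : Int :=
  if l ≤ r then 1 - (PySem.Int.bitLength (PySem.Int.floordiv r l) : Int)
  else (PySem.Int.bitLength (PySem.Int.floordiv (l - 1) r) : Int)

-- ===== PRECONDITION & SPEC =====
-- Pre_ excludes exactly the inputs where A's while-loops never terminate
-- (Python A diverges whenever l ≤ 0 or r ≤ 0).
def Pre_ceillog2 (l : Int) (r : Int) : Prop := 1 ≤ l ∧ 1 ≤ r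
instance (l : Int) (r : Int) : Decidable (Pre_ceillog2 l r) := by unfold Pre_ceillog2; infer_instance
def pvWitness_ceillog2 : Int × Int := (3, 17)

def Spec_ceillog2 (l : Int) (r : Int) (out : Int) : Prop := out = ceillog2_alt l r
instance (l : Int) (r : Int) (out : Int) : Decidable (Spec_ceillog2 l r out) := by unfold Spec_ceillog2; infer_instance

-- ===== CLAIM (what is proved, stated in full; the proofs are below) =====
def Claim_equal_ceillog2 : Prop := ∀ (l : Int) (r : Int), Dom_ceillog2 l r → Pre_ceillog2 l r → Spec_ceillog2 l r (ceillog2 l r)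

-- ===== LEMMAS AND PROOFS =====

-- bitLength characterises the least exponent: for 0 ≤ m, m < 2^k ↔ bitLength m ≤ k.
lemma bitLength_le_iff (m : Int) (k : Nat) :
    PySem.Int.bitLength m ≤ k ↔ m.natAbs < 2 ^ k := by
  constructor
  · intro h
    exact lt_of_lt_of_le (PySem.Int.lt_two_pow_bitLength m) (Nat.pow_le_pow_right (by norm_num) h)
  · intro h
    by_contra hk
    rcases eq_or_ne m 0 with rfl | hm
    · simp [PySem.Int.bitLength_zero] at hk
    · have h1 : 2 ^ (PySem.Int.bitLength m - 1) ≤ m.natAbs := PySem.Int.two_pow_bitLength_le m hm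
      have h2 : k ≤ PySem.Int.bitLength m - 1 := by omega
      have : 2 ^ k ≤ m.natAbs := le_trans (Nat.pow_le_pow_right (by norm_num) h2) h1
      omega

-- generic evaluation of the first loop when the test 'l * 2^j > r' is ↔ 's ≤ j'
lemma pvLoopLe_eval (l r : Int) (s : Nat) (hiff : ∀ j : Nat, l * 2 ^ j > r ↔ s ≤ j) :
    ∀ fuel k, k ≤ s → s < k + fuel → pvLoopLe l r k fuel = -(s : Int) + 1 := by
  intro fuel
  induction fuel with
  | zero => intro k h1 h2; omega
  | succ n ih =>
      intro k h1 h2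
      rw [pvLoopLe]
      by_cases hc : l * 2 ^ k > r
      · have hk : k = s := by have := (hiff k).mp hc; omega
        subst hk; rw [if_pos hc]
      · rw [if_neg hc]
        have : ¬ s ≤ k := fun h => hc ((hiff k).mpr h)
        exact ih (k + 1) (by omega) (by omega)

lemma pvLoopGt_eval (l r : Int) (s : Nat) (hiff : ∀ j : Nat, r * 2 ^ j ≥ l ↔ s ≤ j) :
    ∀ fuel k, k ≤ s → s < k + fuel → pvLoopGt l r k fuel = (s : Int) := by
  intro fuel
  induction fuel with
  | zero => intro k h1 h2; omega
  | succ n ih =>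
      intro k h1 h2
      rw [pvLoopGt]
      by_cases hc : r * 2 ^ k ≥ l
      · have hk : k = s := by have := (hiff k).mp hc; omega
        subst hk; rw [if_pos hc]
      · rw [if_neg hc]
        have : ¬ s ≤ k := fun h => hc ((hiff k).mpr h)
        exact ih (k + 1) (by omega) (by omega)

-- floor-division bracket: for 0 < b, b*q ≤ a < b*(q+1) where q = a // b
lemma floordiv_bracket (a b : Int) (hb : 0 < b) :
    b * PySem.Int.floordiv a b ≤ a ∧ a < b * (PySem.Int.floordiv a b + 1) := by
  rw [PySem.Int.floordiv_eq_ediv_of_pos hb]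
  have h1 := Int.mul_ediv_add_emod a b
  have h2 := Int.emod_nonneg a (by omega : b ≠ 0)
  have h3 := Int.emod_lt_of_pos a hb
  constructor <;> linarith

-- cast form of bitLength_le_iff for nonnegative m
lemma bitLength_le_iff' (m : Int) (hm : 0 ≤ m) (k : Nat) :
    PySem.Int.bitLength m ≤ k ↔ m < (2 : Int) ^ k := by
  rw [bitLength_le_iff]
  have h2 : ((2 ^ k : Nat) : Int) = (2 : Int) ^ k := by push_cast [Nat.cast_ofNat]; ring
  rw [← h2]
  omega

theorem ceillog2_spec : Claim_equal_ceillog2 := by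
  intro l r hdom hpre
  obtain ⟨hl, hr⟩ := hpre
  have hdoml : l ≤ 2147483648 ∧ r ≤ 2147483648 := by
    simp [Dom_ceillog2, pvDomInt] at hdom; omega
  unfold Spec_ceillog2 ceillog2 ceillog2_alt
  by_cases hle : l ≤ r
  · -- branch l ≤ r : q = r // l
    obtain ⟨hb1, hb2⟩ := floordiv_bracket r l (by omega)
    set q := PySem.Int.floordiv r l with hq
    have hq0 : 0 ≤ q := by nlinarith
    have hiff : ∀ j : Nat, l * 2 ^ j > r ↔ PySem.Int.bitLength q ≤ j := by
      intro j
      rw [bitLength_le_iff' q hq0 j]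
      have hp : (0 : Int) < 2 ^ j := by positivity
      constructor
      · intro h
        by_contra hc
        push Not at hc
        have : l * 2 ^ j ≤ l * q := by
          apply mul_le_mul_of_nonneg_left hc (by omega)
        omega
      · intro h
        have : l * (q + 1) ≤ l * 2 ^ j := by
          apply mul_le_mul_of_nonneg_left (by omega) (by omega)
        omega
    have hqr : q ≤ r := by nlinarith
    have hs99 : PySem.Int.bitLength q ≤ 99 := by
      rw [bitLength_le_iff' q hq0 99]
      have : (2147483648 : Int) < 2 ^ 99 := by norm_num
      omega
    rw [if_pos hle, if_pos hle,
        pvLoopLe_eval l r (PySem.Int.bitLength q) hiff 100 0 (by omega) (by omega)]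
    omega
  · -- branch l > r : c = (l - 1) // r
    push Not at hle
    obtain ⟨hb1, hb2⟩ := floordiv_bracket (l - 1) r (by omega)
    set c := PySem.Int.floordiv (l - 1) r with hc
    have hc0 : 0 ≤ c := by nlinarith
    have hiff : ∀ j : Nat, r * 2 ^ j ≥ l ↔ PySem.Int.bitLength c ≤ j := by
      intro j
      rw [bitLength_le_iff' c hc0 j]
      have hp : (0 : Int) < 2 ^ j := by positivity
      constructor
      · intro h
        by_contra hcon
        push Not at hcon
        have : r * 2 ^ j ≤ r * c := by
          apply mul_le_mul_of_nonneg_left hcon (by omega)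
        omega
      · intro h
        have : r * (c + 1) ≤ r * 2 ^ j := by
          apply mul_le_mul_of_nonneg_left (by omega) (by omega)
        omega
    have hcl : c ≤ l - 1 := by nlinarith
    have hs99 : PySem.Int.bitLength c ≤ 99 := by
      rw [bitLength_le_iff' c hc0 99]
      have : (2147483648 : Int) < 2 ^ 99 := by norm_num
      omega
    rw [if_neg (by omega), if_neg (by omega),
        pvLoopGt_eval l r (PySem.Int.bitLength c) hiff 100 0 (by omega) (by omega)]
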